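-- pv_equiv track=rewrite | github.com/clarewest/scripts | icarus_qualityassessment/bin/predict_SCOP.py | stretches_distinguish_ab
-- ===== SOURCE A (Python) =====
-- from itertools import groupby
--
-- def stretches_distinguish_ab(predicted_ss):
--     # group into consecutive elements and collapse, then remove coil regions
--     groups = [ group[0] for group in [list(g) for _, g in groupby(predicted_ss)]]
--     groups[:] = (group for group in groups if group != 'C')
--     longest_stretch = max([len(group) for group in [list(g) for _, g in groupby(groups) ] ])
--     if longest_stretch < 4:
--         return("c")
--     else:
--         return("d")
-- ===== SOURCE B (Python) =====
-- def stretches_distinguish_ab(predicted_ss):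
--     prev = None       # previous element
--     prev_nc = None    # letter of the most recent non-coil run
--     cur = 0           # length of the current merged non-coil stretch
--     best = 0          # longest merged stretch seen so far (0 = none seen)
--     for s in predicted_ss:
--         if s != prev and s != 'C':
--             cur = cur + 1 if s == prev_nc else 1
--             prev_nc = s
--             if cur > best:
--                 best = cur
--         prev = s
--     return "c" if best < 4 else "d"
-- ===== Notes on version B (the rewrite author's own statement) =====
-- stated objective: faster
-- what changed: Replaced the three groupby/list-building passes (collapse runs, drop coils, regroup and take the max) by one stateful O(1)-space scan over predicted_ss tracking prev element, last non-coil letter, current merged stretch and best so far.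
-- crash fix: On inputs whose elements are all 'C' (including the empty list) A raises ValueError from max([]); B returns 'c' (no non-coil stretch, so the longest stretch is trivially shorter than 4). — e.g. on stretches_distinguish_ab(["C"]): A raises ValueError, B returns "c"
import Mathlib
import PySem

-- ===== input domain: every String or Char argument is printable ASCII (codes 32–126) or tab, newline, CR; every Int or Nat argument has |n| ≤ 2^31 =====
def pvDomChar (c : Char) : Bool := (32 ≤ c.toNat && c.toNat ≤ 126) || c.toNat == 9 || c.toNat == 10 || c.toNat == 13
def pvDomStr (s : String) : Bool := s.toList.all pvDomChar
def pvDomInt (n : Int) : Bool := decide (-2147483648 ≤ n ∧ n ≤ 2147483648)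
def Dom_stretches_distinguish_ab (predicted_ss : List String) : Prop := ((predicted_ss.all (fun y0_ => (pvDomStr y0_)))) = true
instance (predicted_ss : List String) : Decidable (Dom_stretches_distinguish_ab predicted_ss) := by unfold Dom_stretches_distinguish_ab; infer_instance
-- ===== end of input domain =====

-- B replaces A's three groupby passes and intermediate lists by one stateful single scan (measured faster in a timing run).

-- ===== PORT A =====
-- groupby + [group[0] ...]: one representative per maximal run of equal consecutive elements
def pvCollapse : List String → List String
  | [] => []
  | [a] => [a]
  | a :: b :: t => if a = b then pvCollapse (b :: t) else a :: pvCollapse (b :: t)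

-- [len(group) for group in groupby(...)]: lengths of the maximal runs
def pvRunLens : List String → List Nat
  | [] => []
  | [_] => [1]
  | a :: b :: t =>
    if a = b then
      match pvRunLens (b :: t) with
      | n :: ns => (n + 1) :: ns
      | [] => [1]      -- unreachable: pvRunLens of a nonempty list is nonempty
    else 1 :: pvRunLens (b :: t)

-- Python max over a nonempty int list (hand port of the builtin; exact for ints)
def pvMax : Nat → List Nat → Nat
  | acc, [] => acc
  | acc, n :: t => pvMax (max acc n) t

def stretches_distinguish_ab (predicted_ss : List String) : String :=
  let groups := pvCollapse predicted_ss
  let groups := groups.filter (fun g => g ≠ "C")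
  match pvRunLens groups with
  | [] => ""          -- Python raises ValueError here (max of empty list); excluded by Pre_
  | n :: ns => if pvMax n ns < 4 then "c" else "d"

-- ===== PORT B =====
-- state: (prev element, last non-coil letter, current merged stretch, best so far)
def pvStepB (st : Option String × Option String × Nat × Nat) (s : String) :
    Option String × Option String × Nat × Nat :=
  if some s ≠ st.1 ∧ s ≠ "C" then
    let cur' := if some s = st.2.1 then st.2.2.1 + 1 else 1
    (some s, some s, cur', max st.2.2.2 cur')
  else
    (some s, st.2.1, st.2.2.1, st.2.2.2)

def stretches_distinguish_ab_alt (predicted_ss : List String) : String :=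
  let st := predicted_ss.foldl pvStepB (none, none, 0, 0)
  if st.2.2.2 < 4 then "c" else "d"

-- ===== PRECONDITION & SPEC =====
-- Pre_ excludes exactly the inputs on which A raises ValueError (max of an empty list):
-- lists whose every element equals "C" (including the empty list).
def Pre_stretches_distinguish_ab (predicted_ss : List String) : Prop :=
  ∃ x ∈ predicted_ss, x ≠ "C"
instance (predicted_ss : List String) : Decidable (Pre_stretches_distinguish_ab predicted_ss) := by unfold Pre_stretches_distinguish_ab; infer_instance

def pvWitness_stretches_distinguish_ab : List String := ["H", "H", "C", "H", "E"]

-- On inputs whose elements are all "C" (including []) A raises ValueError; B returns "c".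
def Raises_stretches_distinguish_ab (predicted_ss : List String) : Prop :=
  ∀ x ∈ predicted_ss, x = "C"
instance (predicted_ss : List String) : Decidable (Raises_stretches_distinguish_ab predicted_ss) := by unfold Raises_stretches_distinguish_ab; infer_instance

def pvRaiseWitness_stretches_distinguish_ab : List String := ["C"]
def pvRaiseWitnessOut_stretches_distinguish_ab : String := "c"

def Spec_stretches_distinguish_ab (predicted_ss : List String) (out : String) : Prop := out = stretches_distinguish_ab_alt predicted_ss
instance (predicted_ss : List String) (out : String) : Decidable (Spec_stretches_distinguish_ab predicted_ss out) := by unfold Spec_stretches_distinguish_ab; infer_instance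

-- ===== CLAIM (what is proved, stated in full; the proofs are below) =====
def Claim_equal_stretches_distinguish_ab : Prop := ∀ (predicted_ss : List String), Dom_stretches_distinguish_ab predicted_ss → Pre_stretches_distinguish_ab predicted_ss → Spec_stretches_distinguish_ab predicted_ss (stretches_distinguish_ab predicted_ss)

def Claim_raises_stretches_distinguish_ab : Prop := (∀ (predicted_ss : List String), Dom_stretches_distinguish_ab predicted_ss → Raises_stretches_distinguish_ab predicted_ss → ¬ Pre_stretches_distinguish_ab predicted_ss) ∧ (Dom_stretches_distinguish_ab (pvRaiseWitness_stretches_distinguish_ab) ∧ Raises_stretches_distinguish_ab (pvRaiseWitness_stretches_distinguish_ab) ∧ stretches_distinguish_ab_alt (pvRaiseWitness_stretches_distinguish_ab) = pvRaiseWitnessOut_stretches_distinguish_ab)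

-- ===== LEMMAS AND PROOFS =====

-- the non-coil run representatives (A's intermediate 'groups' after the filter)
def ncOf (l : List String) : List String := (pvCollapse l).filter (fun g => g ≠ "C")

def maxR : List Nat → Nat
  | [] => 0
  | n :: t => max n (maxR t)

def lastD (ns : List Nat) : Nat := ns.getLast?.getD 0

-- increment the last element (the effect on run lengths of extending the final run)
def bump : List Nat → List Nat
  | [] => [1]
  | [n] => [n + 1]
  | n :: t => n :: bump t

theorem pvMax_eq (ns : List Nat) (acc : Nat) : pvMax acc ns = max acc (maxR ns) := by
  induction ns generalizing acc with
  | nil => simp [pvMax, maxR]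
  | cons n t ih => simp [pvMax, maxR, ih]

theorem bump_shape (ns : List Nat) : ∃ m ms, bump ns = m :: ms := by
  match ns with
  | [] => exact ⟨1, [], rfl⟩
  | [n] => exact ⟨n + 1, [], rfl⟩
  | n :: m :: t => exact ⟨n, bump (m :: t), rfl⟩

theorem runLens_shape (a : String) (t : List String) : ∃ n ns, pvRunLens (a :: t) = n :: ns := by
  cases t with
  | nil => exact ⟨1, [], rfl⟩
  | cons b u =>
    cases h : pvRunLens (b :: u) with
    | nil => exact ⟨1, [], by rw [pvRunLens, h]; split <;> rfl⟩
    | cons n ns =>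
      by_cases hab : a = b
      · exact ⟨n + 1, ns, by rw [pvRunLens, h, if_pos hab]⟩
      · exact ⟨1, n :: ns, by rw [pvRunLens, h, if_neg hab]⟩

theorem collapse_snoc (l : List String) (s : String) :
    pvCollapse (l ++ [s]) = if l.getLast? = some s then pvCollapse l else pvCollapse l ++ [s] := by
  induction l with
  | nil => simp [pvCollapse]
  | cons a t ih =>
    cases t with
    | nil =>
      by_cases h : a = s
      · subst h; simp [pvCollapse]
      · have h' : ¬ s = a := fun e => h e.symm
        simp [pvCollapse, h, h']
    | cons b u =>
      have : (a :: b :: u).getLast? = (b :: u).getLast? := List.getLast?_cons_cons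
      by_cases hab : a = b <;>
        simp only [List.cons_append, pvCollapse, hab, if_true, if_false, this, ih] <;>
        split_ifs <;> simp_all [pvCollapse]

theorem mem_collapse (l : List String) (x : String) (hx : x ∈ l) : x ∈ pvCollapse l := by
  induction l with
  | nil => simp at hx
  | cons a t ih =>
    cases t with
    | nil => simpa [pvCollapse] using hx
    | cons b u =>
      rcases List.mem_cons.1 hx with h | h
      · subst h
        by_cases hab : x = b
        · exact hab ▸ (by simpa [pvCollapse, hab] using ih (by simp [hab]))
        · simp [pvCollapse, hab]
      · by_cases hab : a = b <;> simp [pvCollapse, hab, ih h]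

theorem lastD_bump (ns : List Nat) : lastD (bump ns) = lastD ns + 1 := by
  induction ns with
  | nil => simp [bump, lastD]
  | cons n t ih =>
    cases t with
    | nil => simp [bump, lastD]
    | cons m u =>
      obtain ⟨p, ps, hp⟩ := bump_shape (m :: u)
      simp only [bump, lastD] at ih ⊢
      rw [hp] at ih ⊢
      simpa [List.getLast?_cons_cons] using ih

theorem maxR_bump (ns : List Nat) : maxR (bump ns) = max (maxR ns) (lastD ns + 1) := by
  induction ns with
  | nil => simp [bump, maxR, lastD]
  | cons n t ih =>
    cases t with
    | nil => simp [bump, maxR, lastD]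
    | cons m u =>
      simp only [bump, maxR] at ih ⊢
      have hl : lastD (n :: m :: u) = lastD (m :: u) := by simp [lastD, List.getLast?_cons_cons]
      rw [hl, ih]; omega

theorem lastD_append_one (ns : List Nat) : lastD (ns ++ [1]) = 1 := by
  simp [lastD]

theorem maxR_append_one (ns : List Nat) : maxR (ns ++ [1]) = max (maxR ns) 1 := by
  induction ns with
  | nil => simp [maxR]
  | cons n t ih => simp [maxR, ih]

theorem runLens_snoc (g : List String) (s : String) :
    pvRunLens (g ++ [s]) =
      if g.getLast? = some s then bump (pvRunLens g) else pvRunLens g ++ [1] := by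
  induction g with
  | nil => simp [pvRunLens]
  | cons a t ih =>
    cases t with
    | nil =>
      by_cases h : a = s
      · subst h; simp [pvRunLens, bump]
      · have h' : ¬ s = a := fun e => h e.symm
        simp [pvRunLens, bump, h, h']
    | cons b u =>
      obtain ⟨n, ns, hns⟩ := runLens_shape b u
      obtain ⟨p, ps, hps⟩ := runLens_shape b (u ++ [s])
      have hlast : (a :: b :: u).getLast? = (b :: u).getLast? := List.getLast?_cons_cons
      have hA : pvRunLens (a :: b :: u) = if a = b then (n + 1) :: ns else 1 :: n :: ns := by
        rw [pvRunLens, hns]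
      have hA' : pvRunLens ((a :: b :: u) ++ [s])
          = if a = b then (p + 1) :: ps else 1 :: p :: ps := by
        show pvRunLens (a :: b :: (u ++ [s])) = _
        rw [pvRunLens, hps]
      have hih : p :: ps = if (b :: u).getLast? = some s
          then bump (pvRunLens (b :: u)) else pvRunLens (b :: u) ++ [1] := by
        rw [← hps, ← ih]; rfl
      rw [hA', hlast, hA]
      by_cases hgl : (b :: u).getLast? = some s
      · rw [if_pos hgl]
        rw [if_pos hgl, hns] at hih
        by_cases hab : a = b
        · rw [if_pos hab, if_pos hab]
          cases ns with
          | nil =>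
            have hh : p = n + 1 ∧ ps = ([] : List Nat) := by simpa [bump] using hih
            obtain ⟨rfl, rfl⟩ := hh
            rfl
          | cons n2 ns2 =>
            have : p = n ∧ ps = bump (n2 :: ns2) := by
              simpa [bump] using hih
            obtain ⟨rfl, rfl⟩ := this
            simp [bump]
        · rw [if_neg hab, if_neg hab]
          have hb : bump (1 :: n :: ns) = 1 :: bump (n :: ns) := rfl
          rw [hb, ← hih]
      · rw [if_neg hgl]
        rw [if_neg hgl, hns] at hih
        have : p = n ∧ ps = ns ++ [1] := by simpa using hih
        obtain ⟨rfl, rfl⟩ := this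
        by_cases hab : a = b
        · rw [if_pos hab, if_pos hab]; simp
        · rw [if_neg hab, if_neg hab]; simp

theorem foldB_inv (l : List String) :
    l.foldl pvStepB (none, none, 0, 0) =
      (l.getLast?, (ncOf l).getLast?, lastD (pvRunLens (ncOf l)), maxR (pvRunLens (ncOf l))) := by
  induction l using List.reverseRecOn with
  | nil => simp [ncOf, pvCollapse, pvRunLens, lastD, maxR]
  | append_singleton l s ih =>
    rw [List.foldl_append, List.foldl_cons, List.foldl_nil, ih]
    have hnc : ncOf (l ++ [s]) =
        if l.getLast? = some s then ncOf l
        else if s = "C" then ncOf l else ncOf l ++ [s] := by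
      unfold ncOf
      rw [collapse_snoc]
      by_cases h1 : l.getLast? = some s
      · simp [h1]
      · by_cases h2 : s = "C"
        · subst h2; simp [h1, List.filter_append]
        · simp [h1, h2, List.filter_append]
    by_cases h1 : l.getLast? = some s
    · -- same element continues: B's guard is false, state only updates prev
      have hnc1 : ncOf (l ++ [s]) = ncOf l := by rw [hnc]; simp [h1]
      simp [pvStepB, h1, hnc1, List.getLast?_concat]
    · by_cases h2 : s = "C"
      · -- coil: guard false, nc unchanged
        have hnc1 : ncOf (l ++ [s]) = ncOf l := by rw [hnc]; simp [h1, h2]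
        subst h2
        simp [pvStepB, h1, hnc1, List.getLast?_concat]
      · -- a new non-coil run starts
        have hnc' : ncOf (l ++ [s]) = ncOf l ++ [s] := by rw [hnc]; simp [h1, h2]
        have hrl := runLens_snoc (ncOf l) s
        have h1' : ¬ some s = l.getLast? := fun e => h1 e.symm
        by_cases h3 : (ncOf l).getLast? = some s
        · rw [if_pos h3] at hrl
          simp [pvStepB, h1', h2, h3, hnc', List.getLast?_concat, hrl, lastD_bump, maxR_bump]
        · have h3' : ¬ some s = (ncOf l).getLast? := fun e => h3 e.symm
          rw [if_neg h3] at hrl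
          simp [pvStepB, h1', h2, h3', hnc', List.getLast?_concat, hrl,
            lastD_append_one, maxR_append_one]

theorem nc_ne_nil (l : List String) (h : Pre_stretches_distinguish_ab l) : ncOf l ≠ [] := by
  obtain ⟨x, hx, hxc⟩ := h
  have : x ∈ ncOf l := by
    unfold ncOf
    exact List.mem_filter.2 ⟨mem_collapse l x hx, by simpa using hxc⟩
  intro hnil; rw [hnil] at this; simp at this

-- ===== VERDICT (by name: the statement is the Claim_ definition above) =====
theorem stretches_distinguish_ab_spec : Claim_equal_stretches_distinguish_ab := by
  intro l _dom hpre
  unfold Spec_stretches_distinguish_ab stretches_distinguish_ab stretches_distinguish_ab_alt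
  rw [foldB_inv]
  have hne : ncOf l ≠ [] := nc_ne_nil l hpre
  obtain ⟨a, t, hat⟩ := List.exists_cons_of_ne_nil hne
  obtain ⟨n, ns, hns⟩ := runLens_shape a t
  show (match pvRunLens (ncOf l) with
        | [] => ""
        | n :: ns => if pvMax n ns < 4 then "c" else "d") = _
  rw [hat, hns]
  simp only [hat, hns, pvMax_eq, maxR]
  rfl

theorem stretches_distinguish_ab_raises : Claim_raises_stretches_distinguish_ab := by
  unfold Claim_raises_stretches_distinguish_ab
  refine ⟨?_, by decide⟩
  intro l _dom hall ⟨x, hx, hxc⟩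
  exact hxc (hall x hx)

-- self-check: B's port indeed returns the stated value at the raise witness
theorem stretches_distinguish_ab_raises_witness :
    stretches_distinguish_ab_alt pvRaiseWitness_stretches_distinguish_ab
      = pvRaiseWitnessOut_stretches_distinguish_ab := by
  have h := stretches_distinguish_ab_raises
  unfold Claim_raises_stretches_distinguish_ab at h
  exact h.2.2.2
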